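-- pv_equiv track=rewrite | github.com/islammesabah/CoderAPI | Testing/evaluate_single_code.py | comment_install_command
-- ===== SOURCE A (Python) =====
-- def comment_install_command(data):
--     for inst in data:
--         lines = inst['ground-truth'].split('\n')
--         new_lines = []
--         for line in lines:
--             if "pip install" in line:
--                 line = "# "+line
--             new_lines.append(line)
--         inst['ground-truth'] = '\n'.join(new_lines)
--         lines = inst['prediction'].split('\n')
--         new_lines = []
--         for line in lines:
--             if "pip install" in line:
--                 line = "# "+line
--             new_lines.append(line)
--         inst['prediction'] = '\n'.join(new_lines)
--     return data
-- ===== SOURCE B (Python) =====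
-- def _comment_fix(text):
--     # single forward scan using str.partition, emitting pieces into one buffer
--     parts = []
--     while True:
--         line, sep, text = text.partition('\n')
--         if 'pip install' in line:
--             parts.append('# ')
--         parts.append(line)
--         if not sep:
--             return ''.join(parts)
--         parts.append(sep)
--
-- def comment_install_command(data):
--     for inst in data:
--         for key in ('ground-truth', 'prediction'):
--             inst[key] = _comment_fix(inst[key])
--     return data
-- ===== Notes on version B (the rewrite author's own statement) =====
-- stated objective: simpler
-- what changed: A's two duplicated split('\n')/per-line-loop/join('\n') blocks become one inner loop over the two keys calling a shared helper that scans the string once with str.partition, emitting '# ' prefixes and pieces into a single buffer without ever materialising the list of lines.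
import Mathlib
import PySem

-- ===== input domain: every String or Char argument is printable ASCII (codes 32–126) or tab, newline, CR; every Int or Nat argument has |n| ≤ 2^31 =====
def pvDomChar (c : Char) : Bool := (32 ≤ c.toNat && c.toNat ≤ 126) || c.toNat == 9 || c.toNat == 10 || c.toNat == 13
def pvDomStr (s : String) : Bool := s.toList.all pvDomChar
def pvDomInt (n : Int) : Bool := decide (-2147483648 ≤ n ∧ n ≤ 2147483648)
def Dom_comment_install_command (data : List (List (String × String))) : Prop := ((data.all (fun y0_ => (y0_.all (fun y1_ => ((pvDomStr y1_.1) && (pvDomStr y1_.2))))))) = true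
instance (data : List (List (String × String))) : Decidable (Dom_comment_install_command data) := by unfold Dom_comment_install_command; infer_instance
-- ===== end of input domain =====

-- B replaces A's duplicated split('\n')/loop/join blocks by an inner loop over the two keys
-- calling one shared helper that scans the string once with str.partition (objective: simpler).
-- A and B both mutate the dicts in place in Python; the equivalence proved here is about the
-- returned value (which is the same mutated list in both).


-- ===== PORT A =====
-- A's per-field block: split on '\n', loop appending ('# ' + line) when "pip install" is in
-- the line, join with '\n'.  (Done on List Char; '+' on str is List.append there.)
def fixLinesA (cs : List Char) : List Char :=
  let lines := PySem.Chars.splitOn cs ['\n']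
  let new_lines := lines.foldl
    (fun acc line =>
      acc ++ [if PySem.Chars.isIn "pip install".toList line then "# ".toList ++ line else line])
    []
  PySem.Chars.join ['\n'] new_lines

def comment_install_command (data : List (List (String × String))) : List (List (String × String)) :=
  data.map (fun inst =>
    let d : PySem.Dict String String := PySem.Dict.mk inst
    match d.get? "ground-truth" with
    | none => inst        -- Python raises KeyError here; excluded by Pre_
    | some gt =>
      let d := d.insert "ground-truth" (String.ofList (fixLinesA gt.toList))
      match d.get? "prediction" with
      | none => inst      -- Python raises KeyError here; excluded by Pre_
      | some pr => (d.insert "prediction" (String.ofList (fixLinesA pr.toList))).items)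

-- ===== PORT B =====
-- B's _comment_fix: each round of the while loop partitions at the next '\n'
-- (line, sep, text = text.partition('\n')), emits the optional '# ' prefix, the line and —
-- when sep is nonempty — the separator, then continues on the rest.
def fixScanB (cs : List Char) : List Char :=
  let line := cs.takeWhile (· != '\n')
  let pre := if PySem.Chars.isIn "pip install".toList line then "# ".toList else []
  match _h : cs.dropWhile (· != '\n') with
  | [] => pre ++ line
  | _ :: rest =>
    pre ++ line ++ '\n' :: fixScanB rest
termination_by cs.length
decreasing_by
  have : (cs.dropWhile (· != '\n')).length ≤ cs.length := List.length_dropWhile_le _ _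
  rw [_h] at this; simp at this; omega

-- B's outer body: for each inst, fold the update inst[key] = _comment_fix(inst[key]) over
-- the two keys ('ground-truth', 'prediction').
def comment_install_command_alt (data : List (List (String × String))) : List (List (String × String)) :=
  data.map (fun inst =>
    (["ground-truth", "prediction"].foldl
      (fun (d : PySem.Dict String String) key =>
        match d.get? key with
        | none => d      -- Python raises KeyError here; excluded by Pre_
        | some v => d.insert key (String.ofList (fixScanB v.toList)))
      (PySem.Dict.mk inst)).items)

-- ===== PRECONDITION & SPEC =====
-- Pre_ excludes exactly the inputs where some dict lacks the 'ground-truth' or 'prediction'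
-- key: there the Python A (and B) raises KeyError.
def Pre_comment_install_command (data : List (List (String × String))) : Prop :=
  ∀ inst ∈ data, (inst.any (·.1 == "ground-truth")) = true ∧ (inst.any (·.1 == "prediction")) = true
instance (data : List (List (String × String))) : Decidable (Pre_comment_install_command data) := by
  unfold Pre_comment_install_command; infer_instance

def pvWitness_comment_install_command : (List (List (String × String))) :=
  [[("ground-truth", "pip install x\nprint(1)"), ("prediction", "a\n\nb")]]

def Spec_comment_install_command (data : List (List (String × String))) (out : List (List (String × String))) : Prop := out = comment_install_command_alt data
instance (data : List (List (String × String))) (out : List (List (String × String))) : Decidable (Spec_comment_install_command data out) := by unfold Spec_comment_install_command; infer_instance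

-- ===== CLAIM (what is proved, stated in full; the proofs are below) =====
def Claim_equal_comment_install_command : Prop := ∀ (data : List (List (String × String))), Dom_comment_install_command data → Pre_comment_install_command data → Spec_comment_install_command data (comment_install_command data)

-- ===== LEMMAS AND PROOFS =====

-- Reference shape of splitting at '\n' (proof helper only).
def nlSplit : List Char → List (List Char)
  | [] => [[]]
  | c :: rest =>
    if c = '\n' then [] :: nlSplit rest
    else (c :: (nlSplit rest).headI) :: (nlSplit rest).tail

theorem nlSplit_ne_nil (cs : List Char) : nlSplit cs ≠ [] := by
  cases cs with
  | nil => simp [nlSplit]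
  | cons c rest => by_cases hc : c = '\n' <;> simp [nlSplit, hc]

theorem nlSplit_of_dropWhile_nil (cs : List Char) (h : cs.dropWhile (· != '\n') = []) :
    nlSplit cs = [cs.takeWhile (· != '\n')] := by
  induction cs with
  | nil => simp [nlSplit]
  | cons c rest ih =>
    by_cases hc : c = '\n'
    · subst hc; simp at h
    · simp only [List.dropWhile_cons, List.takeWhile_cons] at h ⊢
      have hb : (c != '\n') = true := by simp [hc]
      rw [hb] at h
      simp only [hb, if_true]
      rw [nlSplit, if_neg hc, ih h]
      simp

theorem nlSplit_of_dropWhile_cons (cs : List Char) (d : Char) (r : List Char)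
    (h : cs.dropWhile (· != '\n') = d :: r) :
    nlSplit cs = cs.takeWhile (· != '\n') :: nlSplit r := by
  induction cs with
  | nil => simp at h
  | cons c rest ih =>
    by_cases hc : c = '\n'
    · subst hc
      simp only [List.dropWhile_cons, List.takeWhile_cons] at h ⊢
      simp only [bne_self_eq_false, Bool.false_eq_true, if_false] at h ⊢
      cases h
      rw [nlSplit]; simp
    · have hb : (c != '\n') = true := by simp [hc]
      simp only [List.dropWhile_cons, List.takeWhile_cons, hb, if_true] at h ⊢
      rw [nlSplit, if_neg hc, ih h]
      simp

theorem splitOn_go_nl (fuel : Nat) (l cur : List Char) (accs : List (List Char))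
    (hf : l.length < fuel) :
    PySem.Chars.splitOn.go ['\n'] fuel l cur accs =
      accs.reverse ++ ((cur.reverse ++ (nlSplit l).headI) :: (nlSplit l).tail) := by
  induction fuel generalizing l cur accs with
  | zero => omega
  | succ f ih =>
    cases l with
    | nil =>
      rw [PySem.Chars.splitOn.go.eq_def]
      simp [nlSplit]
    | cons c rest =>
      rw [PySem.Chars.splitOn.go.eq_def]
      by_cases hc : c = '\n'
      · subst hc
        have hp : (['\n'].isPrefixOf ('\n' :: rest)) = true := by simp [List.isPrefixOf]
        simp only [hp, if_true, List.length_cons, List.length_nil, List.drop_succ_cons,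
          List.drop_zero]
        rw [ih rest [] _ (by simp at hf; omega)]
        rcases hn : nlSplit rest with _ | ⟨x, t⟩
        · exact absurd hn (nlSplit_ne_nil rest)
        · simp [nlSplit, hn]
      · have hp : (['\n'].isPrefixOf (c :: rest)) = false := by
          simp [List.isPrefixOf]; exact fun h => absurd h.symm hc
        simp only [hp, Bool.false_eq_true, if_false]
        rw [ih rest (c :: cur) _ (by simp at hf; omega)]
        rw [nlSplit, if_neg hc]
        simp

theorem splitOn_eq_nlSplit (cs : List Char) :
    PySem.Chars.splitOn cs ['\n'] = nlSplit cs := by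
  rw [PySem.Chars.splitOn, splitOn_go_nl (cs.length + 1) cs [] [] (by omega)]
  rcases hn : nlSplit cs with _ | ⟨x, t⟩
  · exact absurd hn (nlSplit_ne_nil cs)
  · simp

theorem fixB_eq_join (cs : List Char) :
    fixScanB cs = PySem.Chars.join ['\n'] ((nlSplit cs).map
      (fun line => if PySem.Chars.isIn "pip install".toList line then "# ".toList ++ line else line)) := by
  induction hn : cs.length using Nat.strong_induction_on generalizing cs with
  | _ n ih =>
    rw [fixScanB]
    split
    · next h =>
      rw [nlSplit_of_dropWhile_nil cs h]
      simp only [List.map_cons, List.map_nil, PySem.Chars.join_singleton]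
      split <;> simp
    · next d rest h =>
      have hlen : rest.length < n := by
        have h1 : (cs.dropWhile (· != '\n')).length ≤ cs.length := List.length_dropWhile_le _ _
        rw [h] at h1; simp at h1; omega
      rw [nlSplit_of_dropWhile_cons cs d rest h, ih rest.length (by omega) rest rfl]
      rcases hr : nlSplit rest with _ | ⟨x, t⟩
      · exact absurd hr (nlSplit_ne_nil rest)
      · simp only [List.map_cons, PySem.Chars.join_cons_cons]
        split <;> simp

theorem foldl_push_eq_map {A B : Type} (f : A → B) (xs : List A) (acc : List B) :
    xs.foldl (fun acc x => acc ++ [f x]) acc = acc ++ xs.map f := by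
  induction xs generalizing acc with
  | nil => simp
  | cons x xs ih => simp [ih]

theorem fixA_eq_fixB (cs : List Char) : fixLinesA cs = fixScanB cs := by
  rw [fixLinesA, fixB_eq_join, splitOn_eq_nlSplit, foldl_push_eq_map]
  simp

-- A key present in the association list is found by the dict built from it.
theorem mk_get?_isSome (l : List (String × String)) (k : String)
    (h : (l.any (·.1 == k)) = true) : ∃ v, (PySem.Dict.mk l).get? k = some v := by
  induction l with
  | nil => simp at h
  | cons p rest ih =>
    rw [PySem.Dict.get?_mk_cons]
    by_cases hk : p.1 == k
    · exact ⟨p.2, by simp [hk]⟩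
    · simp only [hk, Bool.false_eq_true, if_false]
      simp only [List.any_cons, hk, Bool.false_or] at h
      exact ih h

-- ===== VERDICT (by name: the statement is the Claim_ definition above) =====
theorem comment_install_command_spec : Claim_equal_comment_install_command := by
  intro data _ hpre
  unfold Spec_comment_install_command comment_install_command comment_install_command_alt
  apply List.map_congr_left
  intro inst hmem
  obtain ⟨hg, hp⟩ := hpre inst hmem
  obtain ⟨gt, hgt⟩ := mk_get?_isSome inst "ground-truth" hg
  obtain ⟨pr0, hpr0⟩ := mk_get?_isSome inst "prediction" hp
  have hpr : ((PySem.Dict.mk inst).insert "ground-truth"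
      (String.ofList (fixScanB gt.toList))).get? "prediction" = some pr0 := by
    rw [PySem.Dict.get?_insert_of_ne _ _ (by decide)]; exact hpr0
  simp only [List.foldl, fixA_eq_fixB, hgt, hpr]
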